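-- pv_equiv track=rewrite | github.com/Orderlee/pipeline | src/vlm_pipeline/defs/ingest/sensor_helpers.py | select_latest_per_source_unit
-- ===== SOURCE A (Python) =====
-- def source_unit_group_key(entry: dict) -> str:
--     source_unit_dispatch_key = str(entry.get("source_unit_dispatch_key", "")).strip()
--     if source_unit_dispatch_key:
--         return source_unit_dispatch_key
--     return f"manifest_path:{entry['path']}"
--
-- def select_latest_per_source_unit(entries: list[dict]) -> tuple[list[dict], list[dict]]:
--     grouped: dict[str, list[dict]] = {}
--     for entry in entries:
--         grouped.setdefault(source_unit_group_key(entry), []).append(entry)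
--
--     selected: list[dict] = []
--     superseded: list[dict] = []
--     for group_entries in grouped.values():
--         ordered = sorted(
--             group_entries,
--             key=lambda row: (int(row.get("mtime_ns", 0)), str(row["path"])),
--             reverse=True,
--         )
--         selected.append(ordered[0])
--         superseded.extend(ordered[1:])
--     return selected, superseded
-- ===== SOURCE B (Python) =====
-- def source_unit_group_key(entry: dict) -> str:
--     source_unit_dispatch_key = str(entry.get("source_unit_dispatch_key", "")).strip()
--     if source_unit_dispatch_key:
--         return source_unit_dispatch_key
--     return f"manifest_path:{entry['path']}"
--
--
-- def select_latest_per_source_unit(entries: list[dict]) -> tuple[list[dict], list[dict]]: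
--     # One grouping pass that keeps every group ordered while it is built:
--     # each entry is placed at its stable descending position (newest first,
--     # ties keep arrival order), so no sort call is needed afterwards.
--     groups: dict[str, list[dict]] = {}
--     for entry in entries:
--         k = (int(entry.get("mtime_ns", 0)), str(entry["path"]))
--         lst = groups.setdefault(source_unit_group_key(entry), [])
--         i = 0
--         while i < len(lst) and (int(lst[i].get("mtime_ns", 0)), str(lst[i]["path"])) >= k:
--             i += 1
--         lst.insert(i, entry)
--     selected = [lst[0] for lst in groups.values()]
--     superseded = [row for lst in groups.values() for row in lst[1:]]
--     return selected, superseded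
-- ===== Notes on version B (the rewrite author's own statement) =====
-- stated objective: alternative
-- what changed: Instead of grouping first and then sorting each group and slicing it, B makes a single grouping pass that keeps every group in stable descending (mtime_ns, path) order as entries arrive (positional insertion), so the selection phase is just head/tail of each already-ordered group with no sort call.
import Mathlib
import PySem

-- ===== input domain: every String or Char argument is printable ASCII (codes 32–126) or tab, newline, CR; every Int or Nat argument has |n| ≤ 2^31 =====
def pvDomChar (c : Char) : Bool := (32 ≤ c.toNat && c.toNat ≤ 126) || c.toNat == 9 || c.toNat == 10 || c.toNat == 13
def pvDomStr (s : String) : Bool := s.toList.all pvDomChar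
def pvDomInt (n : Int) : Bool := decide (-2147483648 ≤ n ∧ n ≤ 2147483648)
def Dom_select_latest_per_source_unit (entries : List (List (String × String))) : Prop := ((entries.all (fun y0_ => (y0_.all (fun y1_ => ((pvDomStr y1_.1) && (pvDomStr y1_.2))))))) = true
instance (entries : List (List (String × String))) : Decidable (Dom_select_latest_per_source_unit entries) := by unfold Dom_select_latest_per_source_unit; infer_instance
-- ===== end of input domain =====

-- B replaces A's group-then-sort-each-group pass by a single grouping pass that keeps each
-- group in stable descending order as it is built (alternative decomposition, not faster).

-- ===== PORT A =====
-- helper source_unit_group_key: stripped dispatch key if truthy, else "manifest_path:" + path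
def groupKeyOf (entry : List (String × String)) : String :=
  let s := PySem.Str.strip (((PySem.Dict.mk entry).get? "source_unit_dispatch_key").getD "")
  if s ≠ "" then s
  else PySem.Str.join "" ["manifest_path:", ((PySem.Dict.mk entry).get? "path").getD ""]

-- int(row.get("mtime_ns", 0)); the .getD 0 is only reached outside Pre_ (int() would raise ValueError)
def mtimeOf (row : List (String × String)) : Int :=
  match (PySem.Dict.mk row).get? "mtime_ns" with
  | none => 0
  | some v => (PySem.Int.ofStr? v).getD 0

-- str(row["path"]); the .getD "" is only reached outside Pre_ (KeyError)
def pathOf (row : List (String × String)) : String :=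
  ((PySem.Dict.mk row).get? "path").getD ""

def select_latest_per_source_unit (entries : List (List (String × String))) : (List (List (String × String))) × (List (List (String × String))) :=
  let grouped : PySem.Dict String (List (List (String × String))) :=
    entries.foldl (fun d e => d.modify (groupKeyOf e) [] (fun l => l ++ [e])) PySem.Dict.empty
  grouped.values.foldl
    (fun acc g =>
      let ordered := PySem.List.sorted2 g mtimeOf pathOf true
      (acc.1 ++ [PySem.List.pyGetD ordered 0 []], acc.2 ++ PySem.List.slice ordered (some 1) none))
    ([], [])

-- ===== PORT B =====
-- Python tuple comparison (m_a, p_a) >= (m_b, p_b)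
def keyGe (a b : Int × String) : Bool :=
  decide (b.1 < a.1) || (a.1 == b.1 && decide (b.2 ≤ a.2))

-- the while-scan + list.insert of Source B: keep head while its key is ≥ the new key
def insDesc (x : List (String × String)) : List (List (String × String)) → List (List (String × String))
  | [] => [x]
  | y :: ys =>
      if keyGe (mtimeOf y, pathOf y) (mtimeOf x, pathOf x) then y :: insDesc x ys
      else x :: y :: ys

def select_latest_per_source_unit_alt (entries : List (List (String × String))) : (List (List (String × String))) × (List (List (String × String))) :=
  let groups : PySem.Dict String (List (List (String × String))) :=
    entries.foldl (fun d e => d.modify (groupKeyOf e) [] (insDesc e)) PySem.Dict.empty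
  (groups.values.map (fun lst => PySem.List.pyGetD lst 0 []),
   groups.values.flatMap (fun lst => PySem.List.slice lst (some 1) none))

-- ===== PRECONDITION & SPEC =====
-- Exactly where Python A returns: every entry has a "path" key (else KeyError in the sort key
-- or in source_unit_group_key) and its "mtime_ns" value, if present, parses with int() (else ValueError).
def Pre_select_latest_per_source_unit (entries : List (List (String × String))) : Prop :=
  (entries.all (fun e =>
    ((PySem.Dict.mk e).get? "path").isSome &&
    (((PySem.Dict.mk e).get? "mtime_ns").map (fun v => (PySem.Int.ofStr? v).isSome)).getD true)) = true
instance (entries : List (List (String × String))) : Decidable (Pre_select_latest_per_source_unit entries) := by unfold Pre_select_latest_per_source_unit; infer_instance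

def pvWitness_select_latest_per_source_unit : (List (List (String × String))) :=
  [[("path", "a"), ("mtime_ns", "1")], [("path", "b")]]

def Spec_select_latest_per_source_unit (entries : List (List (String × String))) (out : (List (List (String × String))) × (List (List (String × String)))) : Prop := out = select_latest_per_source_unit_alt entries
instance (entries : List (List (String × String))) (out : (List (List (String × String))) × (List (List (String × String)))) : Decidable (Spec_select_latest_per_source_unit entries out) := by unfold Spec_select_latest_per_source_unit; infer_instance

-- ===== CLAIM (what is proved, stated in full; the proofs are below) =====
def Claim_equal_select_latest_per_source_unit : Prop := ∀ (entries : List (List (String × String))), Dom_select_latest_per_source_unit entries → Pre_select_latest_per_source_unit entries → Spec_select_latest_per_source_unit entries (select_latest_per_source_unit entries)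

-- ===== LEMMAS AND PROOFS =====

-- reverse=True stable sort with A's tuple key, as used on each group
def sortDesc (g : List (List (String × String))) : List (List (String × String)) :=
  PySem.List.sorted2 g mtimeOf pathOf true

-- sorted2's reverse insertion predicate
def beforeRev (a b : List (String × String)) : Bool :=
  decide (mtimeOf b < mtimeOf a) || (!decide (mtimeOf a < mtimeOf b) && decide (pathOf b < pathOf a))

lemma keyGe_eq_not_before (y x : List (String × String)) :
    keyGe (mtimeOf y, pathOf y) (mtimeOf x, pathOf x) = !(beforeRev x y) := by
  simp only [keyGe, beforeRev]
  rcases lt_trichotomy (mtimeOf x) (mtimeOf y) with h | h | h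
  · simp [h, not_lt_of_gt h]
  · by_cases hp : (pathOf y).toList < (pathOf x).toList
    · simp [h, hp, Std.not_le.mpr hp]
    · simp [h, hp, Std.not_lt.mp hp]
  · simp [h, not_lt_of_gt h, Ne.symm (ne_of_gt h)]

lemma insDesc_eq_insertBy (x : List (String × String)) (l : List (List (String × String))) :
    insDesc x l = PySem.List.insertBy beforeRev x l := by
  induction l with
  | nil => rfl
  | cons y ys ih =>
      simp only [insDesc, PySem.List.insertBy, keyGe_eq_not_before, ih]
      cases beforeRev x y <;> simp

lemma sortDesc_eq_foldl (g : List (List (String × String))) :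
    sortDesc g = g.foldl (fun acc x => PySem.List.insertBy beforeRev x acc) [] := by
  rfl

lemma sortDesc_append (g : List (List (String × String))) (e : List (String × String)) :
    sortDesc (g ++ [e]) = insDesc e (sortDesc g) := by
  rw [sortDesc_eq_foldl, sortDesc_eq_foldl, List.foldl_append, insDesc_eq_insertBy]
  rfl

-- F maps an (key, group) item of A's dict to the corresponding item of B's dict
def Fitem (p : String × List (List (String × String))) : String × List (List (String × String)) :=
  (p.1, sortDesc p.2)

lemma get?_mk_map (l : List (String × List (List (String × String)))) (k : String) :
    (PySem.Dict.mk (l.map Fitem)).get? k = ((PySem.Dict.mk l).get? k).map sortDesc := by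
  induction l with
  | nil => rfl
  | cons p ps ih =>
      obtain ⟨k', v⟩ := p
      simp only [List.map, Fitem, PySem.Dict.get?_mk_cons, ih]
      by_cases h : (k' == k) = true <;> simp [h]

lemma contains_mk_map (l : List (String × List (List (String × String)))) (k : String) :
    (PySem.Dict.mk (l.map Fitem)).contains k = (PySem.Dict.mk l).contains k := by
  rw [PySem.Dict.contains_eq_isSome_get?, PySem.Dict.contains_eq_isSome_get?, get?_mk_map]
  cases (PySem.Dict.mk l).get? k <;> rfl

lemma step_rel (d : PySem.Dict String (List (List (String × String)))) (e : List (String × String)) :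
    (PySem.Dict.mk (d.items.map Fitem)).modify (groupKeyOf e) [] (insDesc e) =
    PySem.Dict.mk ((d.modify (groupKeyOf e) [] (fun l => l ++ [e])).items.map Fitem) := by
  have hget : (PySem.Dict.mk (d.items.map Fitem)).getD (groupKeyOf e) [] =
      sortDesc (d.getD (groupKeyOf e) []) := by
    rw [PySem.Dict.getD_eq_get?_getD, PySem.Dict.getD_eq_get?_getD, get?_mk_map]
    cases h : (PySem.Dict.mk d.items).get? (groupKeyOf e)
    · simp [h]; rfl
    · simp [h]
  simp only [PySem.Dict.modify, hget]
  apply PySem.Dict.ext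
  rw [PySem.Dict.items_insert, PySem.Dict.items_insert, contains_mk_map]
  by_cases hc : (PySem.Dict.mk d.items).contains (groupKeyOf e) = true
  · simp only [hc, if_pos]
    show (d.items.map Fitem).map _ = (d.items.map _).map Fitem
    rw [List.map_map, List.map_map]
    apply List.map_congr_left
    intro p _
    by_cases hp : (p.1 == groupKeyOf e) = true
    · simp [Function.comp, Fitem, hp, sortDesc_append]
    · simp [Function.comp, Fitem, hp]
  · simp only [hc, if_neg, Bool.false_eq_true, not_false_iff]
    show (d.items.map Fitem) ++ _ = (d.items ++ _).map Fitem
    simp [Fitem, sortDesc_append]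

lemma build_rel (es : List (List (String × String))) (d : PySem.Dict String (List (List (String × String)))) :
    es.foldl (fun d e => d.modify (groupKeyOf e) [] (insDesc e)) (PySem.Dict.mk (d.items.map Fitem)) =
    PySem.Dict.mk ((es.foldl (fun d e => d.modify (groupKeyOf e) [] (fun l => l ++ [e])) d).items.map Fitem) := by
  induction es generalizing d with
  | nil => rfl
  | cons e es ih =>
      simp only [List.foldl_cons, step_rel d e]
      exact ih _

-- ===== VERDICT (by name: the statement is the Claim_ definition above) =====
lemma values_rel (entries : List (List (String × String))) :
    (entries.foldl (fun d e => d.modify (groupKeyOf e) [] (insDesc e)) PySem.Dict.empty).values =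
    ((entries.foldl (fun d e => d.modify (groupKeyOf e) [] (fun l => l ++ [e])) PySem.Dict.empty).values).map sortDesc := by
  have h := build_rel entries PySem.Dict.empty
  rw [show (PySem.Dict.mk ((PySem.Dict.empty : PySem.Dict String (List (List (String × String)))).items.map Fitem)) = (PySem.Dict.empty : PySem.Dict String (List (List (String × String)))) from rfl] at h
  rw [h]
  simp [PySem.Dict.values, Fitem, List.map_map, Function.comp]

theorem select_latest_per_source_unit_spec : Claim_equal_select_latest_per_source_unit := by
  intro entries _ _
  show select_latest_per_source_unit entries = select_latest_per_source_unit_alt entries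
  simp only [select_latest_per_source_unit, select_latest_per_source_unit_alt]
  rw [values_rel entries]
  set vs := (entries.foldl (fun d e => d.modify (groupKeyOf e) [] (fun l => l ++ [e])) PySem.Dict.empty).values with hvs
  rw [PySem.List.foldl_prod_mk
        (f := fun s g => s ++ [PySem.List.pyGetD (PySem.List.sorted2 g mtimeOf pathOf true) 0 []])
        (g := fun s g => s ++ PySem.List.slice (PySem.List.sorted2 g mtimeOf pathOf true) (some 1) none)]
  rw [PySem.List.foldl_append_singleton_eq_map, PySem.List.foldl_append_eq_flatMap]
  simp [sortDesc, List.map_map, List.flatMap_map, Function.comp]
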